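-- pv_equiv track=rewrite | github.com/mauriciopl/AKImhof_heme | SeqD-HBM/SeqD-HBM_Linux_Win.py | CheckBasicAdjacent
-- ===== SOURCE A (Python) =====
-- def CheckBasicAdjacent(ninemer_sequence):
--     basic_aa_list = ['R', 'K', 'H'] # List of basic and positively charged amino acids
--     flag = "n"
--     for i in range(len(ninemer_sequence)):
--         if(i != 4): # Skip iterating on the coordinating AA in the sequence
--             if(ninemer_sequence[i] in basic_aa_list):
--                 flag = "y"
--                 return(flag)
--     return(flag)
-- ===== SOURCE B (Python) =====
-- def CheckBasicAdjacent(ninemer_sequence):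
--     # Count all basic residues in the whole sequence, then discount the central one.
--     total = sum(1 for ch in ninemer_sequence if ch in "RKH")
--     central = 1 if len(ninemer_sequence) > 4 and ninemer_sequence[4] in "RKH" else 0
--     return "y" if total > central else "n"
-- ===== Notes on version B (the rewrite author's own statement) =====
-- stated objective: alternative
-- what changed: Replaces A's index loop with an i != 4 skip branch and early return by a count-and-discount computation: count every basic residue in the whole string, subtract whether the central position 4 holds one, and compare.
import Mathlib
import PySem

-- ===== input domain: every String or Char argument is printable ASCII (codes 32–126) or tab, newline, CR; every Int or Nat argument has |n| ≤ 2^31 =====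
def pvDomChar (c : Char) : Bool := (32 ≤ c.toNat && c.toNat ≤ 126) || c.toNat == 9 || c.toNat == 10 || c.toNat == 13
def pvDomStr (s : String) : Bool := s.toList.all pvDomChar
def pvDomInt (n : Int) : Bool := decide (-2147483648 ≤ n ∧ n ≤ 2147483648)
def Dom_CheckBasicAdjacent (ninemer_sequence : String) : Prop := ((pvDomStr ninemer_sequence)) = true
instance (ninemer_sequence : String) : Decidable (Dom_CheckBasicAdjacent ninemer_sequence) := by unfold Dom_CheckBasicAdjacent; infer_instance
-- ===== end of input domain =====

-- B replaces A's skip-index-4 loop with early return by counting all basic residues in the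
-- whole sequence and discounting the central one (objective: alternative decomposition).


-- ===== PORT A =====
-- A's for-loop over range(len(s)): index i, skip i == 4, early return "y" on a basic residue.
def CheckBasicAdjacentGo (cs : List Char) (i : Nat) : String :=
  match cs with
  | [] => "n"
  | c :: rest =>
    if i ≠ 4 then
      if c ∈ (['R', 'K', 'H'] : List Char) then "y"
      else CheckBasicAdjacentGo rest (i + 1)
    else CheckBasicAdjacentGo rest (i + 1)

def CheckBasicAdjacent (ninemer_sequence : String) : String :=
  CheckBasicAdjacentGo ninemer_sequence.toList 0

-- ===== PORT B =====
-- total = sum(1 for ch in s if ch in "RKH"); central = 1 if len(s) > 4 and s[4] in "RKH" else 0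
def CheckBasicAdjacent_alt (ninemer_sequence : String) : String :=
  let cs := ninemer_sequence.toList
  let total := cs.countP (fun c => c ∈ (['R', 'K', 'H'] : List Char))
  let central : Nat :=
    if h : 4 < cs.length then
      if cs[4] ∈ (['R', 'K', 'H'] : List Char) then 1 else 0
    else 0
  if total > central then "y" else "n"

-- ===== PRECONDITION & SPEC =====
def Spec_CheckBasicAdjacent (ninemer_sequence : String) (out : String) : Prop := out = CheckBasicAdjacent_alt ninemer_sequence
instance (ninemer_sequence : String) (out : String) : Decidable (Spec_CheckBasicAdjacent ninemer_sequence out) := by unfold Spec_CheckBasicAdjacent; infer_instance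

-- ===== CLAIM =====
def Claim_equal_CheckBasicAdjacent : Prop := ∀ (ninemer_sequence : String), Dom_CheckBasicAdjacent ninemer_sequence → Spec_CheckBasicAdjacent ninemer_sequence (CheckBasicAdjacent ninemer_sequence)

-- ===== LEMMAS AND PROOFS =====

-- After the skipped index, A's loop is a plain "any basic residue" scan.
theorem go_ge_five (cs : List Char) (i : Nat) (h : 5 ≤ i) :
    CheckBasicAdjacentGo cs i =
      if cs.any (fun c => c ∈ (['R', 'K', 'H'] : List Char)) then "y" else "n" := by
  induction cs generalizing i with
  | nil => simp [CheckBasicAdjacentGo]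
  | cons c rest ih =>
    have hne : i ≠ 4 := by omega
    by_cases hc : c ∈ (['R', 'K', 'H'] : List Char) <;>
      simp_all [CheckBasicAdjacentGo, ih (i + 1) (by omega)]

-- A's loop from index i ≤ 4: an "any" scan of the list minus the element landing at index 4.
theorem go_eq (cs : List Char) : ∀ i, i ≤ 4 →
    CheckBasicAdjacentGo cs i = if (cs.take (4 - i) ++ cs.drop (5 - i)).any
        (fun c => c ∈ (['R', 'K', 'H'] : List Char)) then "y" else "n" := by
  induction cs with
  | nil => intro i h; simp [CheckBasicAdjacentGo]
  | cons c rest ih =>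
    intro i h
    by_cases hi : i = 4
    · subst hi
      simp [CheckBasicAdjacentGo, go_ge_five rest 5 (le_refl 5)]
    · rw [show 4 - i = (4 - (i + 1)) + 1 from by omega,
          show 5 - i = (5 - (i + 1)) + 1 from by omega]
      simp only [List.take_succ_cons, List.drop_succ_cons]
      by_cases hc : c ∈ (['R', 'K', 'H'] : List Char) <;>
        simp_all [CheckBasicAdjacentGo, ih (i + 1) (by omega)]

-- B's count-and-discount test equals the "any basic residue outside index 4" scan.
theorem count_discount (cs : List Char) :
    (if cs.countP (fun c => c ∈ (['R', 'K', 'H'] : List Char)) >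
        (if h : 4 < cs.length then
          if cs[4] ∈ (['R', 'K', 'H'] : List Char) then 1 else 0
        else 0) then "y" else "n")
    = if (cs.take 4 ++ cs.drop 5).any
          (fun c => c ∈ (['R', 'K', 'H'] : List Char)) then "y" else "n" := by
  set p : Char → Bool := (fun c => decide (c ∈ (['R', 'K', 'H'] : List Char)))
  have hsplit : cs.countP p = (cs.take 4).countP p + (cs.drop 4).countP p := by
    conv_lhs => rw [← List.take_append_drop 4 cs]
    exact List.countP_append ..
  have hrest : ((cs.take 4 ++ cs.drop 5).any p = true) ↔
      0 < (cs.take 4).countP p + (cs.drop 5).countP p := by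
    rw [← List.countP_append, List.countP_pos_iff, List.any_eq_true]
  by_cases h : 4 < cs.length
  · have hdrop : cs.drop 4 = cs[4] :: cs.drop 5 := List.drop_eq_getElem_cons h
    have htot : cs.countP p =
        ((cs.take 4).countP p + (cs.drop 5).countP p) +
          (if cs[4] ∈ (['R', 'K', 'H'] : List Char) then 1 else 0) := by
      have hpb : (p cs[4] = true) ↔ cs[4] ∈ (['R', 'K', 'H'] : List Char) := by simp [p]
      rw [hsplit, hdrop, List.countP_cons]
      by_cases hb : cs[4] ∈ (['R', 'K', 'H'] : List Char)
      · rw [if_pos (hpb.mpr hb), if_pos hb]; omega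
      · rw [if_neg (fun hc => hb (hpb.mp hc)), if_neg hb]; omega
    rw [dif_pos h, htot]
    by_cases ha : (cs.take 4 ++ cs.drop 5).any p = true
    · have hpos := hrest.mp ha
      rw [if_pos ha]
      rw [if_pos (by
        by_cases hb : cs[4] ∈ (['R', 'K', 'H'] : List Char)
        · rw [if_pos hb]; omega
        · rw [if_neg hb]; omega)]
    · have hz : (cs.take 4).countP p + (cs.drop 5).countP p = 0 := by
      -- otherwise hrest would force ha
        by_contra hnz; exact ha (hrest.mpr (by omega))
      rw [Bool.not_eq_true] at ha
      rw [hz, ha,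
        if_neg (by
          by_cases hb : cs[4] ∈ (['R', 'K', 'H'] : List Char)
          · rw [if_pos hb]; omega
          · rw [if_neg hb]; omega),
        if_neg (by simp)]
  · have htake : cs.take 4 = cs := List.take_of_length_le (by omega)
    have hdropn : cs.drop 5 = [] := List.drop_eq_nil_of_le (by omega)
    have hiff : (cs.any p = true) ↔ 0 < cs.countP p := by
      rw [List.countP_pos_iff, List.any_eq_true]
    rw [dif_neg h, htake, hdropn, List.append_nil]
    by_cases ha : cs.any p = true
    · rw [if_pos ha, if_pos (hiff.mp ha)]
    · have hz : cs.countP p = 0 := by by_contra hnz; exact ha (hiff.mpr (by omega))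
      rw [Bool.not_eq_true] at ha
      rw [hz, ha, if_neg (by omega), if_neg (by simp)]

theorem alt_eq_any (s : String) :
    CheckBasicAdjacent_alt s =
      if (s.toList.take 4 ++ s.toList.drop 5).any
          (fun c => c ∈ (['R', 'K', 'H'] : List Char)) then "y" else "n" := by
  unfold CheckBasicAdjacent_alt
  exact count_discount s.toList

-- ===== VERDICT =====
theorem CheckBasicAdjacent_spec : Claim_equal_CheckBasicAdjacent := by
  intro s _
  show CheckBasicAdjacent s = CheckBasicAdjacent_alt s
  rw [alt_eq_any]
  unfold CheckBasicAdjacent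
  simpa using go_eq s.toList 0 (by omega)
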